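-- pv_equiv track=rewrite | github.com/pbmendoza/mta_ridership | scripts/update_data.py | merge_header
-- ===== SOURCE A (Python) =====
-- from typing import Dict, List, Optional, Tuple
--
-- COLUMN_ORDER = [
--     "transit_timestamp",
--     "transit_mode",
--     "station_complex_id",
--     "station_complex",
--     "borough",
--     "payment_method",
--     "fare_class_category",
--     "ridership",
--     "transfers",
--     "latitude",
--     "longitude",
--     "georeference",
-- ]
--
-- def merge_header(seen_rows: List[Dict[str, str]]) -> List[str]:
--     """Build CSV header from seen rows, respecting column order."""
--     header: List[str] = []
--     for column in COLUMN_ORDER: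
--         if any(column in row for row in seen_rows):
--             header.append(column)
--     for row in seen_rows:
--         for key in row.keys():
--             if key.startswith(":") or key in header:
--                 continue
--             header.append(key)
--     return header
-- ===== SOURCE B (Python) =====
-- from typing import Dict, List
--
-- COLUMN_ORDER = [
--     "transit_timestamp",
--     "transit_mode",
--     "station_complex_id",
--     "station_complex",
--     "borough",
--     "payment_method",
--     "fare_class_category",
--     "ridership",
--     "transfers",
--     "latitude",
--     "longitude",
--     "georeference",
-- ]
--
-- def merge_header(seen_rows: List[Dict[str, str]]) -> List[str]:
--     """Build CSV header by ranking each distinct admissible key and sorting once."""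
--     keep = [k for k in dict.fromkeys(k for row in seen_rows for k in row)
--             if k in COLUMN_ORDER or not k.startswith(":")]
--
--     def rank(k: str) -> int:
--         if k in COLUMN_ORDER:
--             return COLUMN_ORDER.index(k)
--         return len(COLUMN_ORDER) + keep.index(k)
--
--     return sorted(keep, key=rank)
-- ===== Notes on version B (the rewrite author's own statement) =====
-- stated objective: alternative
-- what changed: B computes the header by assigning each distinct admissible key a numeric rank (its COLUMN_ORDER position, or len(COLUMN_ORDER) plus its first-seen position for extra keys) and performing one stable sort on that rank, instead of A's two staged loops that rescan all rows once per COLUMN_ORDER entry and deduplicate extras by membership tests against the growing header.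
import Mathlib
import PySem

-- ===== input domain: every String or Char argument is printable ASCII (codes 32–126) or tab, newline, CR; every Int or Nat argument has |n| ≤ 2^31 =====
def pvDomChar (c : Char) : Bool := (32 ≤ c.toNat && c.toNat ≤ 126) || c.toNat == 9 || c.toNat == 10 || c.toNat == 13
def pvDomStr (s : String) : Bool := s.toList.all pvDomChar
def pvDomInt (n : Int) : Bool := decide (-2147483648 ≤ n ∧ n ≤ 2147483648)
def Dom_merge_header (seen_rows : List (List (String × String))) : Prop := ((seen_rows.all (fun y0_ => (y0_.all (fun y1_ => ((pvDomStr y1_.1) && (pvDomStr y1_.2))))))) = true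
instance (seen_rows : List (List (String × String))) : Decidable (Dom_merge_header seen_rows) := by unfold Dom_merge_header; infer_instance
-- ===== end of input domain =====

-- B ranks each distinct admissible key (COLUMN_ORDER position, or len(COLUMN_ORDER) plus
-- first-seen position for extras) and emits the header by one stable sort on that rank,
-- instead of A's two staged loops (per-column rescans of all rows, then a growing
-- membership-checked accumulator) (objective: alternative).

-- ===== PORT A =====
def columnOrder : List String :=
  ["transit_timestamp", "transit_mode", "station_complex_id", "station_complex",
   "borough", "payment_method", "fare_class_category", "ridership", "transfers",
   "latitude", "longitude", "georeference"]

-- each dict row is an association list; 'column in row' is key membership and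
-- 'row.keys()' iterates the dict's distinct keys in insertion order (PySem.List.dedup).
def merge_header (seen_rows : List (List (String × String))) : List String :=
  let header := columnOrder.foldl (fun h column =>
      if seen_rows.any (fun row => (row.map Prod.fst).contains column)
      then h ++ [column] else h) []
  seen_rows.foldl (fun h row =>
    (PySem.List.dedup (row.map Prod.fst)).foldl (fun h key =>
      if PySem.Str.startswith key ":" || h.contains key then h else h ++ [key]) h) header

-- ===== PORT B =====
-- Source B: keep = admissible distinct keys in first-seen order; sorted(keep, key=rank)
-- where rank(k) = COLUMN_ORDER.index(k) if k in COLUMN_ORDER else len(COLUMN_ORDER)+keep.index(k).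
-- list.index is ported as List.idxOf (first index; always present at every call site).
def merge_header_alt (seen_rows : List (List (String × String))) : List String :=
  let keep := (PySem.List.dedup (seen_rows.flatMap (fun row => PySem.List.dedup (row.map Prod.fst)))).filter
      (fun k => columnOrder.contains k || !PySem.Str.startswith k ":")
  PySem.List.sorted keep (fun k =>
    if columnOrder.contains k then List.idxOf k columnOrder
    else columnOrder.length + List.idxOf k keep) false

-- ===== PRECONDITION & SPEC =====
def Spec_merge_header (seen_rows : List (List (String × String))) (out : List String) : Prop := out = merge_header_alt seen_rows
instance (seen_rows : List (List (String × String))) (out : List String) : Decidable (Spec_merge_header seen_rows out) := by unfold Spec_merge_header; infer_instance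

-- ===== CLAIM (what is proved, stated in full; the proofs are below) =====
def Claim_equal_merge_header : Prop := ∀ (seen_rows : List (List (String × String))), Dom_merge_header seen_rows → Spec_merge_header seen_rows (merge_header seen_rows)

-- ===== LEMMAS AND PROOFS =====

-- the common two-filter normal form both ports are reduced to
def headerOf (S : List String) : List String :=
  columnOrder.filter (fun c => S.contains c)
    ++ S.filter (fun k => !PySem.Str.startswith k ":" && !columnOrder.contains k)

-- ---- A-side characterisation ----

-- folding Set.add from any start list appends exactly the fresh elements, in first-seen order
theorem foldl_add_eq_append_filter {α : Type} [BEq α] [LawfulBEq α]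
    (xs : List α) (s : List α) :
    List.foldl PySem.Set.add s xs = s ++ (PySem.Set.ofList xs).filter (fun k => !s.contains k) := by
  induction xs generalizing s with
  | nil => simp [PySem.Set.ofList]
  | cons k xs ih =>
    have hk : PySem.Set.ofList (k :: xs) = List.foldl PySem.Set.add (PySem.Set.add [] k) xs := by
      simp [PySem.Set.ofList, PySem.Set.empty, List.foldl_cons]
    have hadd : PySem.Set.add ([] : List α) k = [k] := by simp [PySem.Set.add]
    rw [List.foldl_cons, ih, hk, hadd, ih]
    by_cases hmem : k ∈ s
    · have h1 : PySem.Set.add s k = s := by simp [PySem.Set.add, hmem]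
      rw [h1]
      simp only [List.filter_append, List.filter_filter, List.filter_cons]
      simp [hmem]
      apply List.filter_congr
      intro x hx
      by_cases hxk : x = k
      · subst hxk; simp [hmem]
      · simp [hxk]
    · have h1 : PySem.Set.add s k = s ++ [k] := by simp [PySem.Set.add, hmem]
      rw [h1]
      simp only [List.filter_append, List.filter_filter, List.filter_cons, List.append_assoc]
      simp [hmem]
      apply List.filter_congr
      intro x hx
      by_cases hxk : x = k
      · subst hxk; simp
      · simp [hxk, List.mem_append]

-- first-occurrence dedup, cons characterisation
theorem ofList_cons {α : Type} [BEq α] [LawfulBEq α] (k : α) (xs : List α) :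
    PySem.Set.ofList (k :: xs) = k :: (PySem.Set.ofList xs).filter (fun x => x != k) := by
  have hk : PySem.Set.ofList (k :: xs) = List.foldl PySem.Set.add [k] xs := by
    simp [PySem.Set.ofList, PySem.Set.empty, List.foldl_cons, PySem.Set.add]
  rw [hk, foldl_add_eq_append_filter]
  simp
  exact List.filter_congr (fun x _ => by simp [bne])

-- A's second loop, characterised: it appends the fresh admissible keys in first-seen order
theorem loop2_eq (p : String → Bool) (L : List String) (acc : List String) :
    L.foldl (fun h key => if p key || h.contains key then h else h ++ [key]) acc
      = acc ++ (PySem.Set.ofList L).filter (fun k => !p k && !acc.contains k) := by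
  induction L generalizing acc with
  | nil => simp [PySem.Set.ofList]
  | cons k L ih =>
    rw [List.foldl_cons, ofList_cons]
    by_cases hp : p k = true
    · simp only [hp, Bool.true_or, if_true, ih]
      congr 1
      simp only [List.filter_cons, hp]
      simp only [Bool.not_true, Bool.false_and, List.filter_filter]
      apply List.filter_congr
      intro x hx
      by_cases hxk : x = k
      · subst hxk; simp [hp]
      · simp [hxk]
    · simp only [Bool.not_eq_true] at hp
      by_cases hmem : k ∈ acc
      · have : acc.contains k = true := by simpa [List.contains_eq_mem]
        simp only [hp, this, Bool.false_or, if_true, ih]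
        congr 1
        simp only [List.filter_cons, hp, Bool.not_false, Bool.true_and, List.filter_filter]
        simp [hmem]
        apply List.filter_congr
        intro x hx
        by_cases hxk : x = k
        · subst hxk; simp [hmem]
        · simp [hxk]
      · have : acc.contains k = false := by simpa [List.contains_eq_mem]
        simp only [hp, this, Bool.false_or, ih]
        simp only [List.filter_cons, hp, Bool.not_false, Bool.true_and, List.filter_filter]
        simp [hmem]
        apply List.filter_congr
        intro x hx
        by_cases hxk : x = k
        · subst hxk; simp
        · simp [hxk]

-- A computes the two-filter normal form of its key set
theorem merge_header_eq_headerOf (seen_rows : List (List (String × String))) :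
    merge_header seen_rows
      = headerOf (PySem.Set.ofList (seen_rows.flatMap (fun row => PySem.Set.ofList (row.map Prod.fst)))) := by
  unfold merge_header headerOf
  simp only [PySem.List.dedup_eq_ofList]
  set L := seen_rows.flatMap (fun row => PySem.Set.ofList (row.map Prod.fst)) with hL
  have hpres : ∀ c : String,
      (seen_rows.any (fun row => (row.map Prod.fst).contains c)) = ((PySem.Set.ofList L).contains c) := by
    intro c
    rw [Bool.eq_iff_iff]
    simp [List.contains_eq_mem, PySem.Set.mem_ofList, hL, List.mem_flatMap, List.any_eq_true]
  have h1 := PySem.List.foldl_append_if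
    (fun column => seen_rows.any (fun row => (row.map Prod.fst).contains column))
    (id : String → String) columnOrder []
  simp only [id, List.map_id, List.nil_append] at h1
  rw [h1, ← List.foldl_flatMap, ← hL, loop2_eq]
  congr 1
  · exact List.filter_congr (fun c _ => hpres c)
  · apply List.filter_congr
    intro k hk
    have hkL : k ∈ L := (PySem.Set.mem_ofList L k).mp hk
    have hex : ∃ row ∈ seen_rows, ((row.map Prod.fst).contains k) = true := by
      rw [hL] at hkL
      simp only [List.mem_flatMap] at hkL
      obtain ⟨r, hr, hkr⟩ := hkL
      exact ⟨r, hr, by simp [List.contains_eq_mem, (PySem.Set.mem_ofList _ _).mp hkr]⟩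
    congr 1
    rw [Bool.eq_iff_iff]
    have hex' : ∃ x ∈ seen_rows, ∃ v, (k, v) ∈ x := by
      simpa [List.contains_eq_mem, List.mem_map, Prod.exists] using hex
    simp only [List.contains_eq_mem, decide_eq_true_eq, List.mem_filter, List.any_eq_true,
      Bool.not_eq_true', decide_eq_false_iff_not, not_and, not_exists, List.mem_map,
      Prod.exists]
    tauto

-- ---- B-side characterisation ----

-- a nodup list's idxOf is strictly increasing along the list
theorem pairwise_idxOf_lt {l : List String} (h : l.Nodup) :
    l.Pairwise (fun a b => List.idxOf a l < List.idxOf b l) := by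
  rw [List.pairwise_iff_getElem]
  intro i j hi hj hij
  rw [List.Nodup.idxOf_getElem h i hi, List.Nodup.idxOf_getElem h j hj]
  exact hij

-- the rank-sort of the admissible keys is the two-filter normal form
theorem merge_header_alt_eq_headerOf (seen_rows : List (List (String × String))) :
    merge_header_alt seen_rows
      = headerOf (PySem.Set.ofList (seen_rows.flatMap (fun row => PySem.Set.ofList (row.map Prod.fst)))) := by
  unfold merge_header_alt headerOf
  simp only [PySem.List.dedup_eq_ofList]
  set S := PySem.Set.ofList (seen_rows.flatMap (fun row => PySem.Set.ofList (row.map Prod.fst))) with hS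
  have hSnodup : List.Nodup S := by rw [hS]; exact PySem.Set.nodup_ofList _
  set keep := S.filter (fun k => columnOrder.contains k || !PySem.Str.startswith k ":") with hkeep
  have hkeepNodup : keep.Nodup := hSnodup.filter _
  have hCOnodup : columnOrder.Nodup := by decide
  apply PySem.List.sorted_eq_of_perm_of_pairwise_lt
  · -- the normal form is a permutation of keep
    have hsplit : (keep.filter (fun k => columnOrder.contains k)
        ++ keep.filter (fun k => !columnOrder.contains k)).Perm keep :=
      List.filter_append_perm _ keep
    have h2 : keep.filter (fun k => columnOrder.contains k)
        = S.filter (fun k => columnOrder.contains k) := by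
      rw [hkeep, List.filter_filter]
      exact List.filter_congr (fun x _ => by cases hpx : columnOrder.contains x <;> simp [hpx])
    have h3 : keep.filter (fun k => !columnOrder.contains k)
        = S.filter (fun k => !PySem.Str.startswith k ":" && !columnOrder.contains k) := by
      rw [hkeep, List.filter_filter]
      exact List.filter_congr (fun x _ => by
        cases hpx : columnOrder.contains x <;> cases hqx : PySem.Str.startswith x ":" <;>
          simp [hpx, hqx])
    have h4 : (columnOrder.filter (fun c => S.contains c)).Perm
        (S.filter (fun k => columnOrder.contains k)) := by
      apply List.perm_of_nodup_nodup_toFinset_eq (hCOnodup.filter _) (hSnodup.filter _)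
      ext x
      simp [List.contains_eq_mem, and_comm]
    rw [← h2, ← h3] at *
    rw [h2] at h4
    exact (h4.append_right _).trans hsplit
  · -- the normal form is strictly increasing under the rank key
    apply List.pairwise_append.mpr
    refine ⟨?_, ?_, ?_⟩
    · -- within the COLUMN_ORDER part: ranks are columnOrder indices
      have hpw : (columnOrder.filter (fun c => S.contains c)).Pairwise
          (fun a b => List.idxOf a columnOrder < List.idxOf b columnOrder) :=
        (pairwise_idxOf_lt hCOnodup).sublist (List.filter_sublist)
      apply hpw.imp_of_mem
      intro a b ha hb hab
      have hpa : columnOrder.contains a = true := by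
        simp only [List.contains_eq_mem, decide_eq_true_eq]
        exact (List.mem_filter.mp ha).1
      have hpb : columnOrder.contains b = true := by
        simp only [List.contains_eq_mem, decide_eq_true_eq]
        exact (List.mem_filter.mp hb).1
      rw [if_pos hpa, if_pos hpb]
      exact hab
    · -- within the extras part: ranks are keep indices (shifted by the length)
      have hsub : List.Sublist
          (S.filter (fun k => !PySem.Str.startswith k ":" && !columnOrder.contains k)) keep := by
        have heq : S.filter (fun k => !PySem.Str.startswith k ":" && !columnOrder.contains k)
            = keep.filter (fun k => !PySem.Str.startswith k ":" && !columnOrder.contains k) := by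
          rw [hkeep, List.filter_filter]
          exact (List.filter_congr (fun x _ => by
            cases hpx : columnOrder.contains x <;> cases hqx : PySem.Str.startswith x ":" <;>
              simp [hpx, hqx])).symm
        rw [heq]; exact List.filter_sublist
      have hpw : (S.filter (fun k => !PySem.Str.startswith k ":" && !columnOrder.contains k)).Pairwise
          (fun a b => List.idxOf a keep < List.idxOf b keep) :=
        (pairwise_idxOf_lt hkeepNodup).sublist hsub
      apply hpw.imp_of_mem
      intro a b ha hb hab
      have hpa : columnOrder.contains a = false := by
        have := (List.mem_filter.mp ha).2; simp only [Bool.and_eq_true, Bool.not_eq_true'] at this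
        exact this.2
      have hpb : columnOrder.contains b = false := by
        have := (List.mem_filter.mp hb).2; simp only [Bool.and_eq_true, Bool.not_eq_true'] at this
        exact this.2
      rw [if_neg (by rw [hpa]; exact Bool.false_ne_true), if_neg (by rw [hpb]; exact Bool.false_ne_true)]
      omega
    · -- across the two parts: COLUMN_ORDER ranks < length ≤ extras ranks
      intro a ha b hb
      have hamem : a ∈ columnOrder := (List.mem_filter.mp ha).1
      have hpa : columnOrder.contains a = true := by
        simp only [List.contains_eq_mem, decide_eq_true_eq]; exact hamem
      have hpb : columnOrder.contains b = false := by
        have := (List.mem_filter.mp hb).2; simp only [Bool.and_eq_true, Bool.not_eq_true'] at this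
        exact this.2
      rw [if_pos hpa, if_neg (by rw [hpb]; exact Bool.false_ne_true)]
      have hlt : List.idxOf a columnOrder < columnOrder.length :=
        List.idxOf_lt_length_of_mem hamem
      omega

-- ===== VERDICT (by name: the statement is the Claim_ definition above) =====
theorem merge_header_spec : Claim_equal_merge_header := by
  intro seen_rows _
  unfold Spec_merge_header
  rw [merge_header_eq_headerOf, merge_header_alt_eq_headerOf]
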